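-- pv_equiv track=rewrite | github.com/sriramsimhadry/pilot | backend/agents/planner_agent.py | _match_city_after_keyword
-- ===== SOURCE A (Python) =====
-- from typing import Optional
--
-- CITIES = {
--     "hyderabad": {"code": "HYD", "name": "Hyderabad", "display": "Hyderabad"},
--     "hyd": {"code": "HYD", "name": "Hyderabad", "display": "Hyderabad"},
--     "delhi": {"code": "DEL", "name": "Delhi", "display": "Delhi"},
--     "new delhi": {"code": "DEL", "name": "Delhi", "display": "Delhi"},
--     "del": {"code": "DEL", "name": "Delhi", "display": "Delhi"},
--     "mumbai": {"code": "BOM", "name": "Mumbai", "display": "Mumbai"},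
--     "bombay": {"code": "BOM", "name": "Mumbai", "display": "Mumbai"},
--     "bom": {"code": "BOM", "name": "Mumbai", "display": "Mumbai"},
--     "bangalore": {"code": "BLR", "name": "Bangalore", "display": "Bangalore"},
--     "bengaluru": {"code": "BLR", "name": "Bangalore", "display": "Bangalore"},
--     "blr": {"code": "BLR", "name": "Bangalore", "display": "Bangalore"},
--     "chennai": {"code": "MAA", "name": "Chennai", "display": "Chennai"},
--     "madras": {"code": "MAA", "name": "Chennai", "display": "Chennai"},
--     "kolkata": {"code": "CCU", "name": "Kolkata", "display": "Kolkata"},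
--     "calcutta": {"code": "CCU", "name": "Kolkata", "display": "Kolkata"},
--     "pune": {"code": "PNQ", "name": "Pune", "display": "Pune"},
--     "ahmedabad": {"code": "AMD", "name": "Ahmedabad", "display": "Ahmedabad"},
--     "goa": {"code": "GOI", "name": "Goa", "display": "Goa"},
--     "jaipur": {"code": "JAI", "name": "Jaipur", "display": "Jaipur"},
--     "kochi": {"code": "COK", "name": "Kochi", "display": "Kochi"},
--     "cochin": {"code": "COK", "name": "Kochi", "display": "Kochi"},
--     "lucknow": {"code": "LKO", "name": "Lucknow", "display": "Lucknow"},
--     "patna": {"code": "PAT", "name": "Patna", "display": "Patna"},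
--     "bhopal": {"code": "BHO", "name": "Bhopal", "display": "Bhopal"},
--     "varanasi": {"code": "VNS", "name": "Varanasi", "display": "Varanasi"},
--     "indore": {"code": "IDR", "name": "Indore", "display": "Indore"},
--     "nagpur": {"code": "NAG", "name": "Nagpur", "display": "Nagpur"},
--     "visakhapatnam": {"code": "VTZ", "name": "Visakhapatnam", "display": "Visakhapatnam"},
--     "vizag": {"code": "VTZ", "name": "Visakhapatnam", "display": "Visakhapatnam"},
-- }
--
-- def _match_city_after_keyword(
--
--     query: str,
--     keyword: str,
-- ) -> Optional[str]:
--     """Return the known city name that appears immediately after a keyword."""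
--     marker = f"{keyword} "
--     start = query.find(marker)
--     if start < 0:
--         return None
--
--     remainder = query[start + len(marker):].strip()
--     for city_name in sorted(CITIES.keys(), key=len, reverse=True):
--         if remainder == city_name or remainder.startswith(f"{city_name} "):
--             return city_name
--
--     return None
-- ===== SOURCE B (Python) =====
-- from typing import Optional
--
-- CITIES = {
--     "hyderabad": {"code": "HYD", "name": "Hyderabad", "display": "Hyderabad"},
--     "hyd": {"code": "HYD", "name": "Hyderabad", "display": "Hyderabad"},
--     "delhi": {"code": "DEL", "name": "Delhi", "display": "Delhi"},
--     "new delhi": {"code": "DEL", "name": "Delhi", "display": "Delhi"},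
--     "del": {"code": "DEL", "name": "Delhi", "display": "Delhi"},
--     "mumbai": {"code": "BOM", "name": "Mumbai", "display": "Mumbai"},
--     "bombay": {"code": "BOM", "name": "Mumbai", "display": "Mumbai"},
--     "bom": {"code": "BOM", "name": "Mumbai", "display": "Mumbai"},
--     "bangalore": {"code": "BLR", "name": "Bangalore", "display": "Bangalore"},
--     "bengaluru": {"code": "BLR", "name": "Bangalore", "display": "Bangalore"},
--     "blr": {"code": "BLR", "name": "Bangalore", "display": "Bangalore"},
--     "chennai": {"code": "MAA", "name": "Chennai", "display": "Chennai"},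
--     "madras": {"code": "MAA", "name": "Chennai", "display": "Chennai"},
--     "kolkata": {"code": "CCU", "name": "Kolkata", "display": "Kolkata"},
--     "calcutta": {"code": "CCU", "name": "Kolkata", "display": "Kolkata"},
--     "pune": {"code": "PNQ", "name": "Pune", "display": "Pune"},
--     "ahmedabad": {"code": "AMD", "name": "Ahmedabad", "display": "Ahmedabad"},
--     "goa": {"code": "GOI", "name": "Goa", "display": "Goa"},
--     "jaipur": {"code": "JAI", "name": "Jaipur", "display": "Jaipur"},
--     "kochi": {"code": "COK", "name": "Kochi", "display": "Kochi"},
--     "cochin": {"code": "COK", "name": "Kochi", "display": "Kochi"},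
--     "lucknow": {"code": "LKO", "name": "Lucknow", "display": "Lucknow"},
--     "patna": {"code": "PAT", "name": "Patna", "display": "Patna"},
--     "bhopal": {"code": "BHO", "name": "Bhopal", "display": "Bhopal"},
--     "varanasi": {"code": "VNS", "name": "Varanasi", "display": "Varanasi"},
--     "indore": {"code": "IDR", "name": "Indore", "display": "Indore"},
--     "nagpur": {"code": "NAG", "name": "Nagpur", "display": "Nagpur"},
--     "visakhapatnam": {"code": "VTZ", "name": "Visakhapatnam", "display": "Visakhapatnam"},
--     "vizag": {"code": "VTZ", "name": "Visakhapatnam", "display": "Visakhapatnam"},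
-- }
--
--
-- def _match_city_after_keyword(
--     query: str,
--     keyword: str,
-- ) -> Optional[str]:
--     """Return the known city name that appears immediately after a keyword.
--
--     Instead of scanning every known city key, build at most two candidate
--     keys from the leading tokens after the keyword (the two-word prefix
--     first, then the one-word prefix) and return the first that is a key.
--     """
--     _prefix, sep, tail = query.partition(keyword + ' ')
--     if not sep:
--         return None
--     parts = tail.strip().split(' ')
--     if len(parts) >= 2:
--         candidates = [parts[0] + ' ' + parts[1], parts[0]]
--     else:
--         candidates = [parts[0]]
--     return next((c for c in candidates if c in CITIES), None)
-- ===== Notes on version B (the rewrite author's own statement) =====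
-- stated objective: idiomatic
-- what changed: Instead of scanning every city key in length-sorted order against the remainder, B uses str.partition to cut off the keyword, splits the remainder on a single space, and directly looks up at most two candidate keys (the two-word prefix, then the one-word prefix) in the CITIES dict, returning the first hit via next().
import Mathlib
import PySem

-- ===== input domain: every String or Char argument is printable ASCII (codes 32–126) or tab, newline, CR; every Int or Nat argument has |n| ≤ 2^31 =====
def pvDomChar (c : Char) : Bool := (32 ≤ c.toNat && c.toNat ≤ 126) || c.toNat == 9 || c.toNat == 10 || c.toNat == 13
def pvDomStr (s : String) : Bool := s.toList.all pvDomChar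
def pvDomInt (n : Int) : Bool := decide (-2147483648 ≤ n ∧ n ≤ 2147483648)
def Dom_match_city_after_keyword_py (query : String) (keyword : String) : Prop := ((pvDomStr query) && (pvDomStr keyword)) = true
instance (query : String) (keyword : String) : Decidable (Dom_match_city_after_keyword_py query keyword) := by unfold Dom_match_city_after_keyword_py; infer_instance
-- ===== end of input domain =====

-- B replaces A's scan over every (length-sorted) city key by partitioning off the keyword
-- and directly looking up at most two candidate keys built from the leading tokens (idiomatic).

-- ===== PORT A =====
-- The keys of the module constant CITIES, in insertion order (A iterates over them).
def pvCityKeys : List (List Char) :=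
  ["hyderabad".toList, "hyd".toList, "delhi".toList, "new delhi".toList, "del".toList,
   "mumbai".toList, "bombay".toList, "bom".toList, "bangalore".toList, "bengaluru".toList,
   "blr".toList, "chennai".toList, "madras".toList, "kolkata".toList, "calcutta".toList,
   "pune".toList, "ahmedabad".toList, "goa".toList, "jaipur".toList, "kochi".toList,
   "cochin".toList, "lucknow".toList, "patna".toList, "bhopal".toList, "varanasi".toList,
   "indore".toList, "nagpur".toList, "visakhapatnam".toList, "vizag".toList]

-- the loop `for city_name in sorted(CITIES.keys(), key=len, reverse=True): …` with its early return
def pvScanA (rem : List Char) : List (List Char) → Option (List Char)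
  | [] => none
  | c :: rest =>
      if rem = c ∨ PySem.Chars.startswith rem (c ++ [' ']) = true then some c
      else pvScanA rem rest

def match_city_after_keyword_py (query : String) (keyword : String) : Option String :=
  let marker := keyword.toList ++ [' ']
  let start := PySem.Chars.find query.toList marker
  if start < 0 then none
  else
    let remainder :=
      PySem.Chars.strip (PySem.Chars.slice query.toList (some (start + (PySem.Chars.len marker : Int))) none)
    (pvScanA remainder (PySem.List.sorted pvCityKeys (fun c => c.length) true)).map String.ofList

-- ===== PORT B =====
-- Membership test `c in CITIES` for a candidate string (the dict's keys written out; exact).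
def pvIsCity (s : String) : Bool :=
  s == "hyderabad" || s == "hyd" || s == "delhi" || s == "new delhi" || s == "del" ||
  s == "mumbai" || s == "bombay" || s == "bom" || s == "bangalore" || s == "bengaluru" ||
  s == "blr" || s == "chennai" || s == "madras" || s == "kolkata" || s == "calcutta" ||
  s == "pune" || s == "ahmedabad" || s == "goa" || s == "jaipur" || s == "kochi" ||
  s == "cochin" || s == "lucknow" || s == "patna" || s == "bhopal" || s == "varanasi" ||
  s == "indore" || s == "nagpur" || s == "visakhapatnam" || s == "vizag"

-- `next((c for c in candidates if c in CITIES), None)`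
def pvFirstCity : List String → Option String
  | [] => none
  | c :: rest => if pvIsCity c then some c else pvFirstCity rest

def match_city_after_keyword_py_alt (query : String) (keyword : String) : Option String :=
  -- `query.partition(keyword + ' ')`: sep is empty exactly when find is negative,
  -- and then tail is the slice after the first occurrence of the marker (exact).
  let marker := keyword ++ " "
  let i := PySem.Chars.find query.toList marker.toList
  if i < 0 then none
  else
    let tail := PySem.Chars.slice query.toList (some (i + (PySem.Chars.len marker.toList : Int))) none
    let parts := (PySem.Chars.splitOn (PySem.Chars.strip tail) [' ']).map String.ofList
    match parts with
    | p0 :: p1 :: _ => pvFirstCity [p0 ++ " " ++ p1, p0]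
    | [p0] => pvFirstCity [p0]
    | [] => none  -- unreachable: str.split(' ') never returns an empty list

-- ===== PRECONDITION & SPEC =====
def Spec_match_city_after_keyword_py (query : String) (keyword : String) (out : Option String) : Prop := out = match_city_after_keyword_py_alt query keyword
instance (query : String) (keyword : String) (out : Option String) : Decidable (Spec_match_city_after_keyword_py query keyword out) := by unfold Spec_match_city_after_keyword_py; infer_instance

-- ===== CLAIM (what is proved, stated in full; the proofs are below) =====
def Claim_equal_match_city_after_keyword_py : Prop := ∀ (query : String) (keyword : String), Dom_match_city_after_keyword_py query keyword → Spec_match_city_after_keyword_py query keyword (match_city_after_keyword_py query keyword)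

-- ===== LEMMAS AND PROOFS =====

-- Proof-side intermediate form of B's lookup, at the List Char level.
def pvAltLookup : List (List Char) → Option (List Char)
  | [] => none
  | [p0] => if pvCityKeys.contains p0 then some p0 else none
  | p0 :: p1 :: _ =>
      let twoWords := p0 ++ ' ' :: p1
      if pvCityKeys.contains twoWords then some twoWords
      else if pvCityKeys.contains p0 then some p0
      else none

-- Structural recursion computing exactly `remainder.split(' ')` (proved equal to PySem.Chars.splitOn below).
def pvSplitSp : List Char → List (List Char)
  | [] => [[]]
  | c :: r =>
      if c = ' ' then [] :: pvSplitSp r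
      else match pvSplitSp r with
           | [] => [[c]]
           | p :: ps => (c :: p) :: ps

theorem pvSplitSp_ne_nil (r : List Char) : pvSplitSp r ≠ [] := by
  induction r with
  | nil => simp [pvSplitSp]
  | cons c r ih =>
      simp only [pvSplitSp]
      split
      · simp
      · cases h : pvSplitSp r <;> simp

theorem pvGo_eq (fuel : Nat) : ∀ (l cur : List Char) (acc : List (List Char)), l.length < fuel →
    PySem.Chars.splitOn.go [' '] fuel l cur acc =
      acc.reverse ++ (match pvSplitSp l with
                      | [] => []
                      | p :: ps => (cur.reverse ++ p) :: ps) := by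
  induction fuel with
  | zero => intro l cur acc h; omega
  | succ n ih =>
      intro l cur acc h
      rw [PySem.Chars.splitOn.go.eq_def]
      cases l with
      | nil => simp [pvSplitSp]
      | cons c rest =>
          simp only []
          by_cases hc : c = ' '
          · subst hc
            rw [if_pos (by simp [List.isPrefixOf])]
            have hdrop : List.drop [' '].length (' ' :: rest) = rest := rfl
            rw [hdrop, ih rest [] (cur.reverse :: acc) (by simp at h; omega)]
            cases hsp : pvSplitSp rest with
            | nil => exact absurd hsp (pvSplitSp_ne_nil rest)
            | cons p ps => simp [pvSplitSp, hsp]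
          · rw [if_neg (by simp [List.isPrefixOf]; intro he; exact hc he.symm)]
            rw [ih rest (c :: cur) acc (by simp at h ⊢; omega)]
            cases hsp : pvSplitSp rest with
            | nil => exact absurd hsp (pvSplitSp_ne_nil rest)
            | cons p ps => simp [pvSplitSp, hc, hsp]

theorem pvSplitOn_eq (rem : List Char) : PySem.Chars.splitOn rem [' '] = pvSplitSp rem := by
  unfold PySem.Chars.splitOn
  rw [pvGo_eq (rem.length + 1) rem [] [] (by omega)]
  cases hsp : pvSplitSp rem with
  | nil => exact absurd hsp (pvSplitSp_ne_nil rem)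
  | cons p ps => simp

theorem pvSplitSp_no_space {a : List Char} (h : ' ' ∉ a) : pvSplitSp a = [a] := by
  induction a with
  | nil => rfl
  | cons c r ih =>
      simp only [List.mem_cons, not_or] at h
      have hc : ¬ c = ' ' := fun he => h.1 he.symm
      simp [pvSplitSp, hc, ih h.2]

theorem pvSplitSp_append {a : List Char} (r : List Char) (h : ' ' ∉ a) :
    pvSplitSp (a ++ ' ' :: r) = a :: pvSplitSp r := by
  induction a with
  | nil => simp [pvSplitSp]
  | cons c t ih =>
      simp only [List.mem_cons, not_or] at h
      have hc : ¬ c = ' ' := fun he => h.1 he.symm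
      simp [pvSplitSp, hc, ih h.2]

theorem pvSplitSp_inv {rem a : List Char} {l : List (List Char)} (h : pvSplitSp rem = a :: l) :
    ' ' ∉ a ∧ ((l = [] ∧ rem = a) ∨ ∃ r, rem = a ++ ' ' :: r ∧ pvSplitSp r = l) := by
  induction rem generalizing a l with
  | nil =>
      simp [pvSplitSp] at h
      obtain ⟨h1, h2⟩ := h
      subst h1; subst h2
      exact ⟨by simp, Or.inl ⟨rfl, rfl⟩⟩
  | cons c r ih =>
      by_cases hc : c = ' '
      · subst hc
        simp [pvSplitSp] at h
        obtain ⟨h1, h2⟩ := h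
        subst h1
        exact ⟨by simp, Or.inr ⟨r, by simp, h2⟩⟩
      · rw [pvSplitSp] at h
        rw [if_neg hc] at h
        cases hsp : pvSplitSp r with
        | nil => exact absurd hsp (pvSplitSp_ne_nil r)
        | cons p ps =>
            rw [hsp] at h
            simp only [List.cons.injEq] at h
            obtain ⟨h1, h2⟩ := h
            obtain ⟨hp_ns, hp⟩ := ih hsp
            subst h1; subst h2
            have hc' : ¬ ' ' = c := fun he => hc he.symm
            refine ⟨by simp [hp_ns, hc'], ?_⟩
            rcases hp with ⟨hps, hr⟩ | ⟨r', hr', hsp'⟩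
            · exact Or.inl ⟨hps, by rw [hr]⟩
            · exact Or.inr ⟨r', by rw [hr']; simp, hsp'⟩

-- A's per-city test, for a one-word city, holds exactly when the city is the remainder's first token.
theorem pvMatch_one {rem c p0 : List Char} {rest : List (List Char)}
    (hns : ' ' ∉ c) (hsp : pvSplitSp rem = p0 :: rest) :
    (rem = c ∨ (c ++ [' ']) <+: rem) ↔ p0 = c := by
  constructor
  · rintro (hrem | ⟨t, ht⟩)
    · rw [hrem, pvSplitSp_no_space hns] at hsp
      obtain ⟨h1, -⟩ : p0 = c ∧ rest = [] := by simpa using hsp.symm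
      exact h1
    · have hre : rem = c ++ ' ' :: t := by rw [← ht]; simp
      rw [hre, pvSplitSp_append t hns] at hsp
      obtain ⟨h1, -⟩ : p0 = c ∧ rest = pvSplitSp t := by simpa using hsp.symm
      exact h1
  · intro hp
    subst hp
    obtain ⟨hns0, hcase⟩ := pvSplitSp_inv hsp
    rcases hcase with ⟨-, hr⟩ | ⟨r, hr, -⟩
    · exact Or.inl hr
    · exact Or.inr ⟨r, by rw [hr]; simp⟩

-- A's per-city test for the only two-word city, "new delhi".
theorem pvMatch_nd {rem p0 : List Char} {rest : List (List Char)}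
    (hsp : pvSplitSp rem = p0 :: rest) :
    (rem = "new delhi".toList ∨ ("new delhi".toList ++ [' ']) <+: rem) ↔
      (p0 = "new".toList ∧ ∃ qs, rest = "delhi".toList :: qs) := by
  have hnd : "new delhi".toList = "new".toList ++ ' ' :: "delhi".toList := by decide
  have hn_ns : ' ' ∉ "new".toList := by decide
  have hd_ns : ' ' ∉ "delhi".toList := by decide
  constructor
  · rintro (hrem | ⟨t, ht⟩)
    · rw [hrem, hnd, pvSplitSp_append _ hn_ns, pvSplitSp_no_space hd_ns] at hsp
      obtain ⟨h1, h2⟩ : p0 = "new".toList ∧ rest = ["delhi".toList] := by simpa using hsp.symm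
      exact ⟨h1, [], h2⟩
    · have hre : rem = "new".toList ++ ' ' :: ("delhi".toList ++ ' ' :: t) := by
        rw [← ht, hnd]; simp
      rw [hre, pvSplitSp_append _ hn_ns, pvSplitSp_append _ hd_ns] at hsp
      obtain ⟨h1, h2⟩ : p0 = "new".toList ∧ rest = "delhi".toList :: pvSplitSp t := by simpa using hsp.symm
      exact ⟨h1, pvSplitSp t, h2⟩
  · rintro ⟨hp0, qs, hrest⟩
    subst hp0; subst hrest
    obtain ⟨-, hcase⟩ := pvSplitSp_inv hsp
    rcases hcase with ⟨hnil, -⟩ | ⟨r, hr, hsp'⟩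
    · exact absurd hnil (by simp)
    · obtain ⟨-, hcase'⟩ := pvSplitSp_inv hsp'
      rcases hcase' with ⟨-, hr'⟩ | ⟨r', hr', -⟩
      · exact Or.inl (by rw [hr, hr', hnd])
      · exact Or.inr ⟨r', by rw [hr, hr', hnd]; simp⟩

-- Unique decomposition around the first space.
theorem pvSpace_decomp {a b c d : List Char} (h1 : ' ' ∉ a) (h2 : ' ' ∉ c)
    (h : a ++ ' ' :: b = c ++ ' ' :: d) : a = c ∧ b = d := by
  induction a generalizing c with
  | nil =>
      cases c with
      | nil => simpa using h
      | cons x c' =>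
          simp only [List.nil_append, List.cons_append, List.cons.injEq] at h
          exact absurd (h.1 ▸ List.mem_cons_self) h2
  | cons x a' ih =>
      cases c with
      | nil =>
          simp only [List.cons_append, List.nil_append, List.cons.injEq] at h
          exact absurd (h.1 ▸ List.mem_cons_self) h1
      | cons y c' =>
          simp only [List.cons_append, List.cons.injEq] at h
          have := ih (fun hm => h1 (List.mem_cons_of_mem _ hm)) (fun hm => h2 (List.mem_cons_of_mem _ hm)) h.2
          exact ⟨by rw [h.1, this.1], this.2⟩

theorem pvKeys_space : ∀ x ∈ pvCityKeys, ' ' ∈ x → x = "new delhi".toList := by decide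

theorem pvKeys_cases : ∀ x ∈ pvCityKeys, ' ' ∉ x ∨ x = "new delhi".toList := by decide

theorem pvNew_not_key : "new".toList ∉ pvCityKeys := by decide

theorem pvND_key : "new delhi".toList ∈ pvCityKeys := by decide

-- membership in CITIES of the two-word candidate
theorem pvContains_two {p0 p1 : List Char} (hns : ' ' ∉ p0) :
    pvCityKeys.contains (p0 ++ ' ' :: p1) = true ↔ p0 = "new".toList ∧ p1 = "delhi".toList := by
  rw [List.contains_iff_mem]
  constructor
  · intro hmem
    have := pvKeys_space _ hmem (by simp)
    rw [show "new delhi".toList = "new".toList ++ ' ' :: "delhi".toList from by decide] at this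
    exact pvSpace_decomp hns (by decide) this
  · rintro ⟨h1, h2⟩
    subst h1; subst h2
    exact (by decide : ("new".toList ++ ' ' :: "delhi".toList) ∈ pvCityKeys)

theorem pvScan_none {rem : List Char} {L : List (List Char)}
    (h : ∀ c ∈ L, ¬(rem = c ∨ (c ++ [' ']) <+: rem)) : pvScanA rem L = none := by
  induction L with
  | nil => rfl
  | cons c rest ih =>
      rw [pvScanA, if_neg]
      · exact ih (fun c' hc' => h c' (List.mem_cons_of_mem _ hc'))
      · simpa [PySem.Chars.startswith_iff] using h c List.mem_cons_self

theorem pvScan_some {rem p0 : List Char} {L : List (List Char)} (hmem : p0 ∈ L)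
    (h : ∀ c ∈ L, (rem = c ∨ (c ++ [' ']) <+: rem) ↔ c = p0) : pvScanA rem L = some p0 := by
  induction L with
  | nil => exact absurd hmem (by simp)
  | cons c rest ih =>
      by_cases hc : c = p0
      · subst hc
        rw [pvScanA, if_pos]
        simpa [PySem.Chars.startswith_iff] using (h c List.mem_cons_self).mpr rfl
      · rw [pvScanA, if_neg]
        · exact ih (by rcases List.mem_cons.mp hmem with h' | h'; exact absurd h'.symm hc; exact h')
            (fun c' hc' => h c' (List.mem_cons_of_mem _ hc'))
        · simpa [PySem.Chars.startswith_iff, hc] using (h c List.mem_cons_self)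

-- A's scan over the length-sorted keys equals the list-level candidate lookup.
theorem pvMain (rem : List Char) :
    pvScanA rem (PySem.List.sorted pvCityKeys (fun c => c.length) true) =
      pvAltLookup (PySem.Chars.splitOn rem [' ']) := by
  rw [pvSplitOn_eq]
  cases hsp : pvSplitSp rem with
  | nil => exact absurd hsp (pvSplitSp_ne_nil rem)
  | cons p0 rest =>
      have hns0 : ' ' ∉ p0 := (pvSplitSp_inv hsp).1
      have hmem_sorted : ∀ x, x ∈ PySem.List.sorted pvCityKeys (fun c => c.length) true ↔ x ∈ pvCityKeys :=
        fun x => PySem.List.mem_sorted pvCityKeys (fun c => c.length) true x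
      cases rest with
      | nil =>
          simp only [pvAltLookup]
          by_cases hp0 : pvCityKeys.contains p0 = true
          · have hp0m : p0 ∈ pvCityKeys := List.contains_iff_mem.mp hp0
            rw [if_pos hp0]
            apply pvScan_some ((hmem_sorted p0).mpr hp0m)
            intro c hc
            rcases pvKeys_cases c ((hmem_sorted c).mp hc) with hcs | hcnd
            · rw [pvMatch_one hcs hsp]; exact ⟨Eq.symm, Eq.symm⟩
            · subst hcnd
              rw [pvMatch_nd hsp]
              constructor
              · rintro ⟨-, qs, hqs⟩; simp at hqs
              · intro heq; exact absurd (heq ▸ hns0) (by decide)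
          · rw [if_neg hp0]
            apply pvScan_none
            intro c hc
            rcases pvKeys_cases c ((hmem_sorted c).mp hc) with hcs | hcnd
            · rw [pvMatch_one hcs hsp]
              intro hpc
              exact hp0 (List.contains_iff_mem.mpr (hpc ▸ (hmem_sorted c).mp hc))
            · subst hcnd
              rw [pvMatch_nd hsp]
              rintro ⟨-, qs, hqs⟩; simp at hqs
      | cons p1 rest' =>
          simp only [pvAltLookup]
          by_cases htwo : pvCityKeys.contains (p0 ++ ' ' :: p1) = true
          · obtain ⟨h0, h1⟩ := (pvContains_two hns0).mp htwo
            rw [if_pos htwo]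
            subst h0; subst h1
            rw [show ("new".toList ++ ' ' :: "delhi".toList : List Char) = "new delhi".toList from by decide]
            apply pvScan_some ((hmem_sorted _).mpr pvND_key)
            intro c hc
            rcases pvKeys_cases c ((hmem_sorted c).mp hc) with hcs | hcnd
            · rw [pvMatch_one hcs hsp]
              constructor
              · intro h
                exact absurd (h ▸ (hmem_sorted c).mp hc : "new".toList ∈ pvCityKeys) pvNew_not_key
              · intro h
                exact absurd (h ▸ hcs) (by decide)
            · subst hcnd
              rw [pvMatch_nd hsp]
              simp
          · by_cases hp0 : pvCityKeys.contains p0 = true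
            · have hp0m : p0 ∈ pvCityKeys := List.contains_iff_mem.mp hp0
              rw [if_neg htwo, if_pos hp0]
              apply pvScan_some ((hmem_sorted p0).mpr hp0m)
              intro c hc
              rcases pvKeys_cases c ((hmem_sorted c).mp hc) with hcs | hcnd
              · rw [pvMatch_one hcs hsp]; exact ⟨Eq.symm, Eq.symm⟩
              · subst hcnd
                rw [pvMatch_nd hsp]
                constructor
                · rintro ⟨h0, -⟩; exact absurd (h0 ▸ hp0m) pvNew_not_key
                · intro heq; exact absurd (heq ▸ hns0) (by decide)
            · rw [if_neg htwo, if_neg hp0]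
              apply pvScan_none
              intro c hc
              rcases pvKeys_cases c ((hmem_sorted c).mp hc) with hcs | hcnd
              · rw [pvMatch_one hcs hsp]
                intro hpc
                exact hp0 (List.contains_iff_mem.mpr (hpc ▸ (hmem_sorted c).mp hc))
              · subst hcnd
                rw [pvMatch_nd hsp]
                rintro ⟨h0, qs, hqs⟩
                simp only [List.cons.injEq] at hqs
                exact htwo ((pvContains_two hns0).mpr ⟨h0, hqs.1⟩)

-- ===== bridging lemmas between the String-level port B and the list-level lookup =====

theorem pvOfList_eq_iff (c : List Char) (s : String) : (String.ofList c = s) ↔ c = s.toList := by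
  constructor
  · intro h; rw [← h]; simp
  · intro h; rw [h]; simp

set_option maxHeartbeats 1000000 in
theorem pvIsCity_eq (c : List Char) : pvIsCity (String.ofList c) = pvCityKeys.contains c := by
  rw [Bool.eq_iff_iff]
  simp only [pvIsCity, pvCityKeys, Bool.or_eq_true, beq_iff_eq, pvOfList_eq_iff,
    List.contains_iff_mem, List.mem_cons, List.not_mem_nil, or_false, or_assoc]

theorem pvOfList_join (a b : List Char) :
    String.ofList a ++ " " ++ String.ofList b = String.ofList (a ++ ' ' :: b) := by
  rw [← String.toList_inj]; simp

theorem pvBridge_one (p0 : List Char) :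
    pvFirstCity [String.ofList p0] = (pvAltLookup [p0]).map String.ofList := by
  rw [pvFirstCity, pvIsCity_eq]
  simp only [pvAltLookup]
  by_cases h : p0 ∈ pvCityKeys
  · simp [h]
  · simp [h, pvFirstCity]

theorem pvBridge_two (p0 p1 : List Char) (rest : List (List Char)) :
    pvFirstCity [String.ofList p0 ++ " " ++ String.ofList p1, String.ofList p0] =
      (pvAltLookup (p0 :: p1 :: rest)).map String.ofList := by
  rw [pvFirstCity, pvOfList_join, pvIsCity_eq, pvFirstCity, pvIsCity_eq]
  simp only [pvAltLookup]
  by_cases h2 : (p0 ++ ' ' :: p1) ∈ pvCityKeys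
  · simp [h2]
  · by_cases h0 : p0 ∈ pvCityKeys
    · simp [h2, h0]
    · simp [h2, h0, pvFirstCity]

-- ===== VERDICT (by name: the statement is the Claim_ definition above) =====
theorem match_city_after_keyword_py_spec : Claim_equal_match_city_after_keyword_py := by
  intro query keyword _
  unfold Spec_match_city_after_keyword_py match_city_after_keyword_py match_city_after_keyword_py_alt
  simp only [String.toList_append, show (" " : String).toList = [' '] from rfl]
  by_cases h : PySem.Chars.find query.toList (keyword.toList ++ [' ']) < 0
  · simp [h]
  · simp only [h, if_false]
    rw [pvMain]
    cases hsp : PySem.Chars.splitOn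
        (PySem.Chars.strip (PySem.Chars.slice query.toList
          (some (PySem.Chars.find query.toList (keyword.toList ++ [' ']) +
            (PySem.Chars.len (keyword.toList ++ [' ']) : Int))) none)) [' '] with
    | nil => simp [pvAltLookup]
    | cons p0 rest =>
        cases rest with
        | nil => simp only [List.map]; exact (pvBridge_one p0).symm
        | cons p1 rest' => simp only [List.map]; exact (pvBridge_two p0 p1 rest').symm
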